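-- pv_equiv track=rewrite | github.com/cms-sw/cmssw | Validation/RecoTrack/python/plotting/trackingPlots.py | _trackingSubFoldersFallbackSLHC_Phase1PU140
-- ===== SOURCE A (Python) =====
-- def _trackingSubFoldersFallbackSLHC_Phase1PU140(subfolder):
--     ret = subfolder.replace("trackingParticleRecoAsssociation", "AssociatorByHitsRecoDenom")
--     for (old, new) in [("InitialStep",         "Zero"),
--                        ("HighPtTripletStep",   "First"),
--                        ("LowPtQuadStep",       "Second"),
--                        ("LowPtTripletStep",    "Third"),
--                        ("DetachedQuadStep",    "Fourth"),
--                        ("PixelPairStep",       "Fifth"),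
--                        ("MuonSeededStepInOut", "Ninth"),
--                        ("MuonSeededStepOutIn", "Tenth")]:
--         ret = ret.replace(old, new)
--     if ret == subfolder:
--         return None
--     return ret
-- ===== SOURCE B (Python) =====
-- # Single left-to-right scan with an ordered first-match table, instead of nine
-- # sequential full-string replace passes.
-- _TABLE = [("trackingParticleRecoAsssociation", "AssociatorByHitsRecoDenom"),
--           ("InitialStep",         "Zero"),
--           ("HighPtTripletStep",   "First"),
--           ("LowPtQuadStep",       "Second"),
--           ("LowPtTripletStep",    "Third"),
--           ("DetachedQuadStep",    "Fourth"),
--           ("PixelPairStep",       "Fifth"),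
--           ("MuonSeededStepInOut", "Ninth"),
--           ("MuonSeededStepOutIn", "Tenth")]
--
-- def _trackingSubFoldersFallbackSLHC_Phase1PU140(subfolder):
--     out = []
--     i, n = 0, len(subfolder)
--     while i < n:
--         for old, new in _TABLE:
--             if subfolder.startswith(old, i):
--                 out.append(new)
--                 i += len(old)
--                 break
--         else:
--             out.append(subfolder[i])
--             i += 1
--     ret = "".join(out)
--     return None if ret == subfolder else ret
-- ===== Notes on version B (the rewrite author's own statement) =====
-- stated objective: alternative
-- what changed: Nine sequential full-string replace passes are replaced by one left-to-right scan that at each position tries the nine (old,new) pairs in order, emits the first match's replacement and skips past it.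
-- outside the precondition, e.g. on _trackingSubFoldersFallbackSLHC_Phase1PU140('MuonSeededStepOutInitialStep'): A returns 'MuonSeededStepOutZero', B returns 'TenthitialStep'
import Mathlib
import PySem

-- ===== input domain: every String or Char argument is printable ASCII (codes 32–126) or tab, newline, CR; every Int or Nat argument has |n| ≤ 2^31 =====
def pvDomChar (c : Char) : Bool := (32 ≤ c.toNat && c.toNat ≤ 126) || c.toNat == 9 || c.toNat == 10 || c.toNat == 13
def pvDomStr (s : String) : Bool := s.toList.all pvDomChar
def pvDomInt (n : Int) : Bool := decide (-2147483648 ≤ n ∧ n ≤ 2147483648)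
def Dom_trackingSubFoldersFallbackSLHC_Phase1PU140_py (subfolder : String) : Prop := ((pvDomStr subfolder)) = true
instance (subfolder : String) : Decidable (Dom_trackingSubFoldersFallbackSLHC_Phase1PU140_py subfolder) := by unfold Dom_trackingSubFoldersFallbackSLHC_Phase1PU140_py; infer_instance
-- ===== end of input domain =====

-- B replaces A's nine sequential full-string replace passes by ONE left-to-right scan that at
-- each position tries the nine (old,new) pairs in order, emits the first match and skips it.

-- ===== PORT A =====
def trackingSubFoldersFallbackSLHC_Phase1PU140_py (subfolder : String) : Option String :=
  let ret := PySem.Str.replace subfolder "trackingParticleRecoAsssociation" "AssociatorByHitsRecoDenom"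
  let ret := List.foldl (fun (r : String) (p : String × String) => PySem.Str.replace r p.1 p.2) ret
      [("InitialStep",         "Zero"),
       ("HighPtTripletStep",   "First"),
       ("LowPtQuadStep",       "Second"),
       ("LowPtTripletStep",    "Third"),
       ("DetachedQuadStep",    "Fourth"),
       ("PixelPairStep",       "Fifth"),
       ("MuonSeededStepInOut", "Ninth"),
       ("MuonSeededStepOutIn", "Tenth")]
  if ret = subfolder then none else some ret

-- ===== PORT B =====
def pvkA : List Char := ['t', 'r', 'a', 'c', 'k', 'i', 'n', 'g', 'P', 'a', 'r', 't', 'i', 'c', 'l', 'e', 'R', 'e', 'c', 'o', 'A', 's', 's', 's', 'o', 'c', 'i', 'a', 't', 'i', 'o', 'n']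
def pvkIn : List Char := ['I', 'n', 'i', 't', 'i', 'a', 'l', 'S', 't', 'e', 'p']
def pvkHi : List Char := ['H', 'i', 'g', 'h', 'P', 't', 'T', 'r', 'i', 'p', 'l', 'e', 't', 'S', 't', 'e', 'p']
def pvkLQ : List Char := ['L', 'o', 'w', 'P', 't', 'Q', 'u', 'a', 'd', 'S', 't', 'e', 'p']
def pvkLT : List Char := ['L', 'o', 'w', 'P', 't', 'T', 'r', 'i', 'p', 'l', 'e', 't', 'S', 't', 'e', 'p']
def pvkDQ : List Char := ['D', 'e', 't', 'a', 'c', 'h', 'e', 'd', 'Q', 'u', 'a', 'd', 'S', 't', 'e', 'p']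
def pvkPP : List Char := ['P', 'i', 'x', 'e', 'l', 'P', 'a', 'i', 'r', 'S', 't', 'e', 'p']
def pvkMI : List Char := ['M', 'u', 'o', 'n', 'S', 'e', 'e', 'd', 'e', 'd', 'S', 't', 'e', 'p', 'I', 'n', 'O', 'u', 't']
def pvkMO : List Char := ['M', 'u', 'o', 'n', 'S', 'e', 'e', 'd', 'e', 'd', 'S', 't', 'e', 'p', 'O', 'u', 't', 'I', 'n']
def pvvA : List Char := ['A', 's', 's', 'o', 'c', 'i', 'a', 't', 'o', 'r', 'B', 'y', 'H', 'i', 't', 's', 'R', 'e', 'c', 'o', 'D', 'e', 'n', 'o', 'm']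
def pvvIn : List Char := ['Z', 'e', 'r', 'o']
def pvvHi : List Char := ['F', 'i', 'r', 's', 't']
def pvvLQ : List Char := ['S', 'e', 'c', 'o', 'n', 'd']
def pvvLT : List Char := ['T', 'h', 'i', 'r', 'd']
def pvvDQ : List Char := ['F', 'o', 'u', 'r', 't', 'h']
def pvvPP : List Char := ['F', 'i', 'f', 't', 'h']
def pvvMI : List Char := ['N', 'i', 'n', 't', 'h']
def pvvMO : List Char := ['T', 'e', 'n', 't', 'h']

-- the scan table of B, in B's order (first match wins)
def pvKEYS : List (List Char × List Char) :=
  [(pvkA, pvvA), (pvkIn, pvvIn), (pvkHi, pvvHi), (pvkLQ, pvvLQ), (pvkLT, pvvLT),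
   (pvkDQ, pvvDQ), (pvkPP, pvvPP), (pvkMI, pvvMI), (pvkMO, pvvMO)]

theorem pvKEYS_key_pos : ∀ p ∈ pvKEYS, 0 < p.1.length := by decide

-- hand port of B's while loop (Python has no PySem regex/scan primitive): at each position try
-- the table entries in order via startswith; on a match emit the replacement and jump past the
-- matched key, otherwise copy one character.  Exact for every input string.
def pvScan : List Char → List Char
  | [] => []
  | c :: t =>
    match h : pvKEYS.find? (fun p => p.1.isPrefixOf (c :: t)) with
    | some p => p.2 ++ pvScan ((c :: t).drop p.1.length)
    | none => c :: pvScan t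
termination_by u => u.length
decreasing_by
  · have hmem := List.mem_of_find?_eq_some h
    have hpos := pvKEYS_key_pos p hmem
    simp only [List.length_drop, List.length_cons]
    omega
  · simp

def trackingSubFoldersFallbackSLHC_Phase1PU140_py_alt (subfolder : String) : Option String :=
  let ret := String.ofList (pvScan subfolder.toList)
  if ret = subfolder then none else some ret

-- ===== PRECONDITION & SPEC =====
-- Pre_ excludes strings containing one of the two substrings in which two of the nine search
-- keys OVERLAP ("MuonSeededStepInOut" overlapping "trackingParticleRecoAsssociation" on 't',
-- "MuonSeededStepOutIn" overlapping "InitialStep" on "In"): there A resolves the overlap by its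
-- pass order and B by leftmost match — both defensible, neither specified.
def Pre_trackingSubFoldersFallbackSLHC_Phase1PU140_py (subfolder : String) : Prop :=
  PySem.Str.isIn "MuonSeededStepInOutrackingParticleRecoAsssociation" subfolder = false ∧
  PySem.Str.isIn "MuonSeededStepOutInitialStep" subfolder = false
instance (subfolder : String) : Decidable (Pre_trackingSubFoldersFallbackSLHC_Phase1PU140_py subfolder) := by unfold Pre_trackingSubFoldersFallbackSLHC_Phase1PU140_py; infer_instance

def pvWitness_trackingSubFoldersFallbackSLHC_Phase1PU140_py : String := "Tracking/trackingParticleRecoAsssociation/InitialStep"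

def Spec_trackingSubFoldersFallbackSLHC_Phase1PU140_py (subfolder : String) (out : Option String) : Prop := out = trackingSubFoldersFallbackSLHC_Phase1PU140_py_alt subfolder
instance (subfolder : String) (out : Option String) : Decidable (Spec_trackingSubFoldersFallbackSLHC_Phase1PU140_py subfolder out) := by unfold Spec_trackingSubFoldersFallbackSLHC_Phase1PU140_py; infer_instance

-- ===== CLAIM (what is proved, stated in full; the proofs are below) =====
def Claim_equal_trackingSubFoldersFallbackSLHC_Phase1PU140_py : Prop := ∀ (subfolder : String), Dom_trackingSubFoldersFallbackSLHC_Phase1PU140_py subfolder → Pre_trackingSubFoldersFallbackSLHC_Phase1PU140_py subfolder → Spec_trackingSubFoldersFallbackSLHC_Phase1PU140_py subfolder (trackingSubFoldersFallbackSLHC_Phase1PU140_py subfolder)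

-- ===== LEMMAS AND PROOFS =====

-- the two overlap substrings excluded by Pre_, and the tails used in the overlap arguments
def pvM1 : List Char := ['M', 'u', 'o', 'n', 'S', 'e', 'e', 'd', 'e', 'd', 'S', 't', 'e', 'p', 'I', 'n', 'O', 'u', 't', 'r', 'a', 'c', 'k', 'i', 'n', 'g', 'P', 'a', 'r', 't', 'i', 'c', 'l', 'e', 'R', 'e', 'c', 'o', 'A', 's', 's', 's', 'o', 'c', 'i', 'a', 't', 'i', 'o', 'n']
def pvM2 : List Char := ['M', 'u', 'o', 'n', 'S', 'e', 'e', 'd', 'e', 'd', 'S', 't', 'e', 'p', 'O', 'u', 't', 'I', 'n', 'i', 't', 'i', 'a', 'l', 'S', 't', 'e', 'p']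
def pvRack : List Char := ['r', 'a', 'c', 'k', 'i', 'n', 'g', 'P', 'a', 'r', 't', 'i', 'c', 'l', 'e', 'R', 'e', 'c', 'o', 'A', 's', 's', 's', 'o', 'c', 'i', 'a', 't', 'i', 'o', 'n']
def pvItial : List Char := ['i', 't', 'i', 'a', 'l', 'S', 't', 'e', 'p']


-- a clean structural version of Python's str.replace (old ≠ []), greedy leftmost
def pvRepl (old new : List Char) : List Char → List Char
  | [] => []
  | c :: t =>
    if old.isPrefixOf (c :: t) ∧ old ≠ [] then new ++ pvRepl old new (t.drop (old.length - 1))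
    else c :: pvRepl old new t
termination_by u => u.length
decreasing_by
  · simp only [List.length_cons]
    have := @List.length_drop Char (old.length - 1) t
    omega
  · simp

theorem pvRepl_nil (o n : List Char) : pvRepl o n [] = [] := by simp [pvRepl]

theorem pvRepl_neg' (o n : List Char) (c : Char) (t : List Char)
    (h : ¬ (o <+: (c :: t) ∧ o ≠ [])) :
    pvRepl o n (c :: t) = c :: pvRepl o n t := by
  rw [pvRepl]
  rw [if_neg (by rw [List.isPrefixOf_iff_prefix]; exact h)]

theorem pvRepl_neg (o n : List Char) (c : Char) (t : List Char) (h : ¬ o <+: (c :: t)) :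
    pvRepl o n (c :: t) = c :: pvRepl o n t := by
  rw [pvRepl]
  simp [List.isPrefixOf_iff_prefix, h]

theorem pvRepl_head (o n t : List Char) (ho : o ≠ []) :
    pvRepl o n (o ++ t) = n ++ pvRepl o n t := by
  obtain ⟨c, o', rfl⟩ : ∃ c o', o = c :: o' := by
    cases o with
    | nil => exact absurd rfl ho
    | cons c o' => exact ⟨c, o', rfl⟩
  rw [List.cons_append, pvRepl]
  have hpre : (c :: o').isPrefixOf (c :: (o' ++ t)) = true := by
    rw [List.isPrefixOf_iff_prefix, List.cons_prefix_cons]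
    exact ⟨rfl, ⟨t, rfl⟩⟩
  simp only [hpre, ne_eq, reduceCtorEq, not_false_eq_true, and_true, if_true]
  congr 1
  have : (c :: o').length - 1 = o'.length := by simp
  rw [this, List.drop_left]

-- no occurrence of o can start inside a (for the given continuation X): the pass copies a
theorem pvRepl_append (a o n X : List Char)
    (h : ∀ d < a.length, ¬ o <+: (a.drop d ++ X)) :
    pvRepl o n (a ++ X) = a ++ pvRepl o n X := by
  induction a with
  | nil => simp
  | cons c a' ih =>
    rw [List.cons_append, pvRepl_neg o n c (a' ++ X) (by simpa using h 0 (by simp))]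
    rw [List.cons_append]
    congr 1
    exact ih (fun d hd => by simpa [List.drop_succ_cons] using h (d + 1) (by simpa using Nat.succ_lt_succ hd))

-- a and o nowhere comparable ⇒ the pass copies a whatever follows
theorem pvRepl_skip (a o : List Char)
    (hc : ∀ d < a.length, ¬ (a.drop d <+: o) ∧ ¬ (o <+: a.drop d)) (n X : List Char) :
    pvRepl o n (a ++ X) = a ++ pvRepl o n X := by
  apply pvRepl_append
  intro d hd hpre
  rcases List.prefix_or_prefix_of_prefix hpre (⟨X, rfl⟩ : a.drop d <+: a.drop d ++ X) with h1 | h2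
  · exact (hc d hd).2 h1
  · exact (hc d hd).1 h2

-- prefix reflection: if no suffix of q is comparable with the inserted value n,
-- then a prefix q of the replaced string was already a prefix of the original
theorem pvRepl_prefix_reflect' (n o : List Char) :
    ∀ (u q : List Char), (∀ d < q.length, ¬ (q.drop d <+: n) ∧ ¬ (n <+: q.drop d)) →
      q <+: pvRepl o n u → q <+: u := by
  intro u
  induction u with
  | nil =>
    intro q hc hpre
    rwa [pvRepl_nil] at hpre
  | cons c t ih =>
    intro q hc hpre
    by_cases hp : o <+: (c :: t) ∧ o ≠ []
    · rw [pvRepl, if_pos (by rw [List.isPrefixOf_iff_prefix]; exact hp)] at hpre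
      cases q with
      | nil => exact List.nil_prefix
      | cons q0 q' =>
        rcases List.prefix_or_prefix_of_prefix hpre (⟨_, rfl⟩ : n <+: n ++ _) with h1 | h2
        · exact absurd h1 (hc 0 (by simp)).1
        · exact absurd h2 (hc 0 (by simp)).2
    · rw [pvRepl_neg' o n c t hp] at hpre
      cases q with
      | nil => exact List.nil_prefix
      | cons q0 q' =>
        rw [List.cons_prefix_cons] at hpre
        obtain ⟨rfl, hq'⟩ := hpre
        rw [List.cons_prefix_cons]
        refine ⟨rfl, ih q' (fun d hd => by simpa [List.drop_succ_cons] using hc (d + 1) (by simpa using Nat.succ_lt_succ hd)) hq'⟩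

-- PySem.Chars.replace agrees with pvRepl for nonempty old
theorem pvGo_spec (o n : List Char) (ho : o ≠ []) :
    ∀ (fuel : Nat) (l acc : List Char), l.length ≤ fuel →
      PySem.Chars.replace.go o n fuel l acc = acc.reverse ++ pvRepl o n l := by
  intro fuel
  induction fuel with
  | zero =>
    intro l acc hl
    have : l = [] := List.eq_nil_of_length_eq_zero (Nat.le_zero.mp hl)
    subst this
    rw [PySem.Chars.replace.go.eq_1, pvRepl_nil]
  | succ f ih =>
    intro l acc hl
    cases l with
    | nil =>
      rw [PySem.Chars.replace.go.eq_2 o n _ acc (by simp), pvRepl_nil, List.append_nil]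
    | cons c t =>
      obtain ⟨c0, o', rfl⟩ : ∃ c0 o', o = c0 :: o' := by
        cases o with
        | nil => exact absurd rfl ho
        | cons c0 o' => exact ⟨c0, o', rfl⟩
      rw [PySem.Chars.replace.go.eq_3]
      by_cases hp : (c0 :: o').isPrefixOf (c :: t) = true
      · rw [if_pos hp]
        have hdrop : List.drop (c0 :: o').length (c :: t) = t.drop ((c0 :: o').length - 1) := by
          simp [List.drop_succ_cons]
        rw [ih _ _ (by simp at hl ⊢; omega)]
        rw [pvRepl, if_pos (by rw [List.isPrefixOf_iff_prefix]; exact ⟨List.isPrefixOf_iff_prefix.mp hp, by simp⟩)]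
        rw [hdrop, List.reverse_append, List.reverse_reverse, List.append_assoc]
      · rw [if_neg hp]
        rw [ih t (c :: acc) (by simp at hl ⊢; omega)]
        rw [pvRepl_neg _ n c t (fun hh => hp (List.isPrefixOf_iff_prefix.mpr hh))]
        simp

theorem pvReplace_eq (o n s : List Char) (ho : o ≠ []) :
    PySem.Chars.replace s o n = pvRepl o n s := by
  rw [PySem.Chars.replace]
  rw [if_neg (by simp [List.isEmpty_iff, ho])]
  simpa using pvGo_spec o n ho s.length s [] (le_refl _)

-- A's nine passes, on the character level
def pvChain (u : List Char) : List Char := List.foldl (fun s p => pvRepl p.1 p.2 s) u pvKEYS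

theorem pvScan_nil : pvScan [] = [] := by simp [pvScan]

theorem pvScan_cons_some (c : Char) (t : List Char) (p : List Char × List Char)
    (h : pvKEYS.find? (fun p => p.1.isPrefixOf (c :: t)) = some p) :
    pvScan (c :: t) = p.2 ++ pvScan ((c :: t).drop p.1.length) := by
  rw [pvScan]
  split
  · rename_i q hq
    rw [h] at hq
    cases hq
    rfl
  · rename_i hq
    rw [h] at hq
    cases hq

theorem pvScan_cons_none (c : Char) (t : List Char)
    (h : pvKEYS.find? (fun p => p.1.isPrefixOf (c :: t)) = none) :
    pvScan (c :: t) = c :: pvScan t := by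
  rw [pvScan]
  split
  · rename_i q hq
    rw [h] at hq
    cases hq
  · rfl

theorem pvChain_split_A (t : List Char) :
    pvChain (pvkA ++ t) = pvvA ++ pvChain t := by
  simp only [pvChain, pvKEYS, List.foldl]
  rw [pvRepl_head pvkA pvvA _ (by decide)]
  rw [pvRepl_skip pvvA pvkIn (by decide)]
  rw [pvRepl_skip pvvA pvkHi (by decide)]
  rw [pvRepl_skip pvvA pvkLQ (by decide)]
  rw [pvRepl_skip pvvA pvkLT (by decide)]
  rw [pvRepl_skip pvvA pvkDQ (by decide)]
  rw [pvRepl_skip pvvA pvkPP (by decide)]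
  rw [pvRepl_skip pvvA pvkMI (by decide)]
  rw [pvRepl_skip pvvA pvkMO (by decide)]

theorem pvChain_split_In (t : List Char) :
    pvChain (pvkIn ++ t) = pvvIn ++ pvChain t := by
  simp only [pvChain, pvKEYS, List.foldl]
  rw [pvRepl_skip pvkIn pvkA (by decide)]
  rw [pvRepl_head pvkIn pvvIn _ (by decide)]
  rw [pvRepl_skip pvvIn pvkHi (by decide)]
  rw [pvRepl_skip pvvIn pvkLQ (by decide)]
  rw [pvRepl_skip pvvIn pvkLT (by decide)]
  rw [pvRepl_skip pvvIn pvkDQ (by decide)]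
  rw [pvRepl_skip pvvIn pvkPP (by decide)]
  rw [pvRepl_skip pvvIn pvkMI (by decide)]
  rw [pvRepl_skip pvvIn pvkMO (by decide)]

theorem pvChain_split_Hi (t : List Char) :
    pvChain (pvkHi ++ t) = pvvHi ++ pvChain t := by
  simp only [pvChain, pvKEYS, List.foldl]
  rw [pvRepl_skip pvkHi pvkA (by decide)]
  rw [pvRepl_skip pvkHi pvkIn (by decide)]
  rw [pvRepl_head pvkHi pvvHi _ (by decide)]
  rw [pvRepl_skip pvvHi pvkLQ (by decide)]
  rw [pvRepl_skip pvvHi pvkLT (by decide)]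
  rw [pvRepl_skip pvvHi pvkDQ (by decide)]
  rw [pvRepl_skip pvvHi pvkPP (by decide)]
  rw [pvRepl_skip pvvHi pvkMI (by decide)]
  rw [pvRepl_skip pvvHi pvkMO (by decide)]

theorem pvChain_split_LQ (t : List Char) :
    pvChain (pvkLQ ++ t) = pvvLQ ++ pvChain t := by
  simp only [pvChain, pvKEYS, List.foldl]
  rw [pvRepl_skip pvkLQ pvkA (by decide)]
  rw [pvRepl_skip pvkLQ pvkIn (by decide)]
  rw [pvRepl_skip pvkLQ pvkHi (by decide)]
  rw [pvRepl_head pvkLQ pvvLQ _ (by decide)]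
  rw [pvRepl_skip pvvLQ pvkLT (by decide)]
  rw [pvRepl_skip pvvLQ pvkDQ (by decide)]
  rw [pvRepl_skip pvvLQ pvkPP (by decide)]
  rw [pvRepl_skip pvvLQ pvkMI (by decide)]
  rw [pvRepl_skip pvvLQ pvkMO (by decide)]

theorem pvChain_split_LT (t : List Char) :
    pvChain (pvkLT ++ t) = pvvLT ++ pvChain t := by
  simp only [pvChain, pvKEYS, List.foldl]
  rw [pvRepl_skip pvkLT pvkA (by decide)]
  rw [pvRepl_skip pvkLT pvkIn (by decide)]
  rw [pvRepl_skip pvkLT pvkHi (by decide)]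
  rw [pvRepl_skip pvkLT pvkLQ (by decide)]
  rw [pvRepl_head pvkLT pvvLT _ (by decide)]
  rw [pvRepl_skip pvvLT pvkDQ (by decide)]
  rw [pvRepl_skip pvvLT pvkPP (by decide)]
  rw [pvRepl_skip pvvLT pvkMI (by decide)]
  rw [pvRepl_skip pvvLT pvkMO (by decide)]

theorem pvChain_split_DQ (t : List Char) :
    pvChain (pvkDQ ++ t) = pvvDQ ++ pvChain t := by
  simp only [pvChain, pvKEYS, List.foldl]
  rw [pvRepl_skip pvkDQ pvkA (by decide)]
  rw [pvRepl_skip pvkDQ pvkIn (by decide)]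
  rw [pvRepl_skip pvkDQ pvkHi (by decide)]
  rw [pvRepl_skip pvkDQ pvkLQ (by decide)]
  rw [pvRepl_skip pvkDQ pvkLT (by decide)]
  rw [pvRepl_head pvkDQ pvvDQ _ (by decide)]
  rw [pvRepl_skip pvvDQ pvkPP (by decide)]
  rw [pvRepl_skip pvvDQ pvkMI (by decide)]
  rw [pvRepl_skip pvvDQ pvkMO (by decide)]

theorem pvChain_split_PP (t : List Char) :
    pvChain (pvkPP ++ t) = pvvPP ++ pvChain t := by
  simp only [pvChain, pvKEYS, List.foldl]
  rw [pvRepl_skip pvkPP pvkA (by decide)]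
  rw [pvRepl_skip pvkPP pvkIn (by decide)]
  rw [pvRepl_skip pvkPP pvkHi (by decide)]
  rw [pvRepl_skip pvkPP pvkLQ (by decide)]
  rw [pvRepl_skip pvkPP pvkLT (by decide)]
  rw [pvRepl_skip pvkPP pvkDQ (by decide)]
  rw [pvRepl_head pvkPP pvvPP _ (by decide)]
  rw [pvRepl_skip pvvPP pvkMI (by decide)]
  rw [pvRepl_skip pvvPP pvkMO (by decide)]

theorem pvChain_split_MI (t : List Char) (hrk : ¬ pvRack <+: t) :
    pvChain (pvkMI ++ t) = pvvMI ++ pvChain t := by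
  simp only [pvChain, pvKEYS, List.foldl]
  rw [pvRepl_append pvkMI pvkA pvvA t ?hA]
  case hA =>
    intro d hd hpre
    by_cases hd18 : d = 18
    · subst hd18
      have : pvRack <+: t := by
        simpa [pvkMI, pvkA, pvRack] using hpre
      exact hrk this
    · have hcmp : ¬ (pvkMI.drop d <+: pvkA) ∧ ¬ (pvkA <+: pvkMI.drop d) := by
        have hall : ∀ d < pvkMI.length, d ≠ 18 → ¬ (pvkMI.drop d <+: pvkA) ∧ ¬ (pvkA <+: pvkMI.drop d) := by decide
        exact hall d hd hd18
      rcases List.prefix_or_prefix_of_prefix hpre (⟨t, rfl⟩ : pvkMI.drop d <+: pvkMI.drop d ++ t) with h1 | h2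
      · exact hcmp.2 h1
      · exact hcmp.1 h2
  rw [pvRepl_skip pvkMI pvkIn (by decide)]
  rw [pvRepl_skip pvkMI pvkHi (by decide)]
  rw [pvRepl_skip pvkMI pvkLQ (by decide)]
  rw [pvRepl_skip pvkMI pvkLT (by decide)]
  rw [pvRepl_skip pvkMI pvkDQ (by decide)]
  rw [pvRepl_skip pvkMI pvkPP (by decide)]
  rw [pvRepl_head pvkMI pvvMI _ (by decide)]
  rw [pvRepl_skip pvvMI pvkMO (by decide)]

theorem pvChain_split_MO (t : List Char) (hit : ¬ pvItial <+: t) :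
    pvChain (pvkMO ++ t) = pvvMO ++ pvChain t := by
  simp only [pvChain, pvKEYS, List.foldl]
  rw [pvRepl_skip pvkMO pvkA (by decide)]
  rw [pvRepl_append pvkMO pvkIn pvvIn (pvRepl pvkA pvvA t) ?hIn]
  case hIn =>
    intro d hd hpre
    by_cases hd17 : d = 17
    · subst hd17
      have hstep : pvItial <+: pvRepl pvkA pvvA t := by
        simpa [pvkMO, pvkIn, pvItial] using hpre
      exact hit (pvRepl_prefix_reflect' pvvA pvkA t pvItial (by decide) hstep)
    · have hcmp : ¬ (pvkMO.drop d <+: pvkIn) ∧ ¬ (pvkIn <+: pvkMO.drop d) := by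
        have hall : ∀ d < pvkMO.length, d ≠ 17 → ¬ (pvkMO.drop d <+: pvkIn) ∧ ¬ (pvkIn <+: pvkMO.drop d) := by decide
        exact hall d hd hd17
      rcases List.prefix_or_prefix_of_prefix hpre (⟨_, rfl⟩ : pvkMO.drop d <+: pvkMO.drop d ++ pvRepl pvkA pvvA t) with h1 | h2
      · exact hcmp.2 h1
      · exact hcmp.1 h2
  rw [pvRepl_skip pvkMO pvkHi (by decide)]
  rw [pvRepl_skip pvkMO pvkLQ (by decide)]
  rw [pvRepl_skip pvkMO pvkLT (by decide)]
  rw [pvRepl_skip pvkMO pvkDQ (by decide)]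
  rw [pvRepl_skip pvkMO pvkPP (by decide)]
  rw [pvRepl_skip pvkMO pvkMI (by decide)]
  rw [pvRepl_head pvkMO pvvMO _ (by decide)]

theorem pvChain_cons (c : Char) (t : List Char)
    (h : ∀ p ∈ pvKEYS, ¬ (p.1 <+: (c :: t))) :
    pvChain (c :: t) = c :: pvChain t := by
  have h0 : ¬ pvkA <+: (c :: t) := h (pvkA, pvvA) (by simp [pvKEYS])
  have h1 : ¬ pvkIn <+: (c :: t) := h (pvkIn, pvvIn) (by simp [pvKEYS])
  have h2 : ¬ pvkHi <+: (c :: t) := h (pvkHi, pvvHi) (by simp [pvKEYS])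
  have h3 : ¬ pvkLQ <+: (c :: t) := h (pvkLQ, pvvLQ) (by simp [pvKEYS])
  have h4 : ¬ pvkLT <+: (c :: t) := h (pvkLT, pvvLT) (by simp [pvKEYS])
  have h5 : ¬ pvkDQ <+: (c :: t) := h (pvkDQ, pvvDQ) (by simp [pvKEYS])
  have h6 : ¬ pvkPP <+: (c :: t) := h (pvkPP, pvvPP) (by simp [pvKEYS])
  have h7 : ¬ pvkMI <+: (c :: t) := h (pvkMI, pvvMI) (by simp [pvKEYS])
  have h8 : ¬ pvkMO <+: (c :: t) := h (pvkMO, pvvMO) (by simp [pvKEYS])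
  simp only [pvChain, pvKEYS, List.foldl]
  rw [pvRepl_neg pvkA pvvA c t h0]
  rw [pvRepl_neg pvkIn pvvIn c _ ?g1]
  rw [pvRepl_neg pvkHi pvvHi c _ ?g2]
  rw [pvRepl_neg pvkLQ pvvLQ c _ ?g3]
  rw [pvRepl_neg pvkLT pvvLT c _ ?g4]
  rw [pvRepl_neg pvkDQ pvvDQ c _ ?g5]
  rw [pvRepl_neg pvkPP pvvPP c _ ?g6]
  rw [pvRepl_neg pvkMI pvvMI c _ ?g7]
  rw [pvRepl_neg pvkMO pvvMO c _ ?g8]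
  case g1 =>
    intro hpre
    rw [show pvkIn = 'I' :: ['n', 'i', 't', 'i', 'a', 'l', 'S', 't', 'e', 'p'] from rfl, List.cons_prefix_cons] at hpre
    obtain ⟨hc0, hq0⟩ := hpre
    have hq1 := pvRepl_prefix_reflect' pvvA pvkA _ _ (by decide) hq0
    exact h1 (by rw [show pvkIn = 'I' :: ['n', 'i', 't', 'i', 'a', 'l', 'S', 't', 'e', 'p'] from rfl, List.cons_prefix_cons]; exact ⟨hc0, hq1⟩)
  case g2 =>
    intro hpre
    rw [show pvkHi = 'H' :: ['i', 'g', 'h', 'P', 't', 'T', 'r', 'i', 'p', 'l', 'e', 't', 'S', 't', 'e', 'p'] from rfl, List.cons_prefix_cons] at hpre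
    obtain ⟨hc0, hq0⟩ := hpre
    have hq1 := pvRepl_prefix_reflect' pvvIn pvkIn _ _ (by decide) hq0
    have hq2 := pvRepl_prefix_reflect' pvvA pvkA _ _ (by decide) hq1
    exact h2 (by rw [show pvkHi = 'H' :: ['i', 'g', 'h', 'P', 't', 'T', 'r', 'i', 'p', 'l', 'e', 't', 'S', 't', 'e', 'p'] from rfl, List.cons_prefix_cons]; exact ⟨hc0, hq2⟩)
  case g3 =>
    intro hpre
    rw [show pvkLQ = 'L' :: ['o', 'w', 'P', 't', 'Q', 'u', 'a', 'd', 'S', 't', 'e', 'p'] from rfl, List.cons_prefix_cons] at hpre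
    obtain ⟨hc0, hq0⟩ := hpre
    have hq1 := pvRepl_prefix_reflect' pvvHi pvkHi _ _ (by decide) hq0
    have hq2 := pvRepl_prefix_reflect' pvvIn pvkIn _ _ (by decide) hq1
    have hq3 := pvRepl_prefix_reflect' pvvA pvkA _ _ (by decide) hq2
    exact h3 (by rw [show pvkLQ = 'L' :: ['o', 'w', 'P', 't', 'Q', 'u', 'a', 'd', 'S', 't', 'e', 'p'] from rfl, List.cons_prefix_cons]; exact ⟨hc0, hq3⟩)
  case g4 =>
    intro hpre
    rw [show pvkLT = 'L' :: ['o', 'w', 'P', 't', 'T', 'r', 'i', 'p', 'l', 'e', 't', 'S', 't', 'e', 'p'] from rfl, List.cons_prefix_cons] at hpre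
    obtain ⟨hc0, hq0⟩ := hpre
    have hq1 := pvRepl_prefix_reflect' pvvLQ pvkLQ _ _ (by decide) hq0
    have hq2 := pvRepl_prefix_reflect' pvvHi pvkHi _ _ (by decide) hq1
    have hq3 := pvRepl_prefix_reflect' pvvIn pvkIn _ _ (by decide) hq2
    have hq4 := pvRepl_prefix_reflect' pvvA pvkA _ _ (by decide) hq3
    exact h4 (by rw [show pvkLT = 'L' :: ['o', 'w', 'P', 't', 'T', 'r', 'i', 'p', 'l', 'e', 't', 'S', 't', 'e', 'p'] from rfl, List.cons_prefix_cons]; exact ⟨hc0, hq4⟩)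
  case g5 =>
    intro hpre
    rw [show pvkDQ = 'D' :: ['e', 't', 'a', 'c', 'h', 'e', 'd', 'Q', 'u', 'a', 'd', 'S', 't', 'e', 'p'] from rfl, List.cons_prefix_cons] at hpre
    obtain ⟨hc0, hq0⟩ := hpre
    have hq1 := pvRepl_prefix_reflect' pvvLT pvkLT _ _ (by decide) hq0
    have hq2 := pvRepl_prefix_reflect' pvvLQ pvkLQ _ _ (by decide) hq1
    have hq3 := pvRepl_prefix_reflect' pvvHi pvkHi _ _ (by decide) hq2
    have hq4 := pvRepl_prefix_reflect' pvvIn pvkIn _ _ (by decide) hq3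
    have hq5 := pvRepl_prefix_reflect' pvvA pvkA _ _ (by decide) hq4
    exact h5 (by rw [show pvkDQ = 'D' :: ['e', 't', 'a', 'c', 'h', 'e', 'd', 'Q', 'u', 'a', 'd', 'S', 't', 'e', 'p'] from rfl, List.cons_prefix_cons]; exact ⟨hc0, hq5⟩)
  case g6 =>
    intro hpre
    rw [show pvkPP = 'P' :: ['i', 'x', 'e', 'l', 'P', 'a', 'i', 'r', 'S', 't', 'e', 'p'] from rfl, List.cons_prefix_cons] at hpre
    obtain ⟨hc0, hq0⟩ := hpre
    have hq1 := pvRepl_prefix_reflect' pvvDQ pvkDQ _ _ (by decide) hq0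
    have hq2 := pvRepl_prefix_reflect' pvvLT pvkLT _ _ (by decide) hq1
    have hq3 := pvRepl_prefix_reflect' pvvLQ pvkLQ _ _ (by decide) hq2
    have hq4 := pvRepl_prefix_reflect' pvvHi pvkHi _ _ (by decide) hq3
    have hq5 := pvRepl_prefix_reflect' pvvIn pvkIn _ _ (by decide) hq4
    have hq6 := pvRepl_prefix_reflect' pvvA pvkA _ _ (by decide) hq5
    exact h6 (by rw [show pvkPP = 'P' :: ['i', 'x', 'e', 'l', 'P', 'a', 'i', 'r', 'S', 't', 'e', 'p'] from rfl, List.cons_prefix_cons]; exact ⟨hc0, hq6⟩)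
  case g7 =>
    intro hpre
    rw [show pvkMI = 'M' :: ['u', 'o', 'n', 'S', 'e', 'e', 'd', 'e', 'd', 'S', 't', 'e', 'p', 'I', 'n', 'O', 'u', 't'] from rfl, List.cons_prefix_cons] at hpre
    obtain ⟨hc0, hq0⟩ := hpre
    have hq1 := pvRepl_prefix_reflect' pvvPP pvkPP _ _ (by decide) hq0
    have hq2 := pvRepl_prefix_reflect' pvvDQ pvkDQ _ _ (by decide) hq1
    have hq3 := pvRepl_prefix_reflect' pvvLT pvkLT _ _ (by decide) hq2
    have hq4 := pvRepl_prefix_reflect' pvvLQ pvkLQ _ _ (by decide) hq3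
    have hq5 := pvRepl_prefix_reflect' pvvHi pvkHi _ _ (by decide) hq4
    have hq6 := pvRepl_prefix_reflect' pvvIn pvkIn _ _ (by decide) hq5
    have hq7 := pvRepl_prefix_reflect' pvvA pvkA _ _ (by decide) hq6
    exact h7 (by rw [show pvkMI = 'M' :: ['u', 'o', 'n', 'S', 'e', 'e', 'd', 'e', 'd', 'S', 't', 'e', 'p', 'I', 'n', 'O', 'u', 't'] from rfl, List.cons_prefix_cons]; exact ⟨hc0, hq7⟩)
  case g8 =>
    intro hpre
    rw [show pvkMO = 'M' :: ['u', 'o', 'n', 'S', 'e', 'e', 'd', 'e', 'd', 'S', 't', 'e', 'p', 'O', 'u', 't', 'I', 'n'] from rfl, List.cons_prefix_cons] at hpre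
    obtain ⟨hc0, hq0⟩ := hpre
    have hq1 := pvRepl_prefix_reflect' pvvMI pvkMI _ _ (by decide) hq0
    have hq2 := pvRepl_prefix_reflect' pvvPP pvkPP _ _ (by decide) hq1
    have hq3 := pvRepl_prefix_reflect' pvvDQ pvkDQ _ _ (by decide) hq2
    have hq4 := pvRepl_prefix_reflect' pvvLT pvkLT _ _ (by decide) hq3
    have hq5 := pvRepl_prefix_reflect' pvvLQ pvkLQ _ _ (by decide) hq4
    have hq6 := pvRepl_prefix_reflect' pvvHi pvkHi _ _ (by decide) hq5
    have hq7 := pvRepl_prefix_reflect' pvvIn pvkIn _ _ (by decide) hq6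
    have hq8 := pvRepl_prefix_reflect' pvvA pvkA _ _ (by decide) hq7
    exact h8 (by rw [show pvkMO = 'M' :: ['u', 'o', 'n', 'S', 'e', 'e', 'd', 'e', 'd', 'S', 't', 'e', 'p', 'O', 'u', 't', 'I', 'n'] from rfl, List.cons_prefix_cons]; exact ⟨hc0, hq8⟩)

theorem pvChain_nil : pvChain [] = [] := by
  simp [pvChain, pvKEYS, List.foldl, pvRepl_nil]

theorem pvInfix_of_cons {M : List Char} {c : Char} {t : List Char} (h : M <:+: t) : M <:+: (c :: t) := by
  obtain ⟨s, e, hse⟩ := h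
  exact ⟨c :: s, e, by rw [← hse]; rfl⟩

theorem pvInfix_of_append {M k : List Char} {t : List Char} (h : M <:+: t) : M <:+: (k ++ t) := by
  obtain ⟨s, e, hse⟩ := h
  exact ⟨k ++ s, e, by rw [← hse]; simp⟩

theorem pvMain : ∀ (N : Nat) (u : List Char), u.length ≤ N →
    ¬ pvM1 <:+: u → ¬ pvM2 <:+: u → pvChain u = pvScan u := by
  intro N
  induction N with
  | zero =>
    intro u hu _ _
    have : u = [] := List.eq_nil_of_length_eq_zero (Nat.le_zero.mp hu)
    subst this
    rw [pvChain_nil, pvScan_nil]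
  | succ n ih =>
    intro u hu h1 h2
    cases u with
    | nil => rw [pvChain_nil, pvScan_nil]
    | cons c t =>
      cases hfind : pvKEYS.find? (fun p => p.1.isPrefixOf (c :: t)) with
      | none =>
        have hN : ∀ p ∈ pvKEYS, ¬ (p.1 <+: (c :: t)) := fun p hp hpre =>
          (List.find?_eq_none.mp hfind p hp) (List.isPrefixOf_iff_prefix.mpr hpre)
        rw [pvScan_cons_none c t hfind, pvChain_cons c t hN]
        rw [ih t (by simpa using Nat.lt_succ_iff.mp (by simpa using hu)) (fun hm => h1 (pvInfix_of_cons hm)) (fun hm => h2 (pvInfix_of_cons hm))]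
      | some p =>
        have hmem := List.mem_of_find?_eq_some hfind
        have hpb := List.find?_some (p := fun (q : List Char × List Char) => q.1.isPrefixOf (c :: t)) hfind
        have hpre : p.1 <+: (c :: t) := List.isPrefixOf_iff_prefix.mp (by simpa using hpb)
        obtain ⟨r, hr⟩ := hpre
        have hdrop : (c :: t).drop p.1.length = r := by rw [← hr, List.drop_left]
        rw [pvScan_cons_some c t p hfind, hdrop]
        have hlen : r.length ≤ n := by
          have hk := pvKEYS_key_pos p hmem
          have hlt : p.1.length + r.length = t.length + 1 := by
            have h' := congrArg List.length hr
            simpa [List.length_append] using h'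
          have hu' : t.length + 1 ≤ n + 1 := by simpa using hu
          omega
        have hr1 : ¬ pvM1 <:+: r := fun hm => h1 (by rw [← hr]; exact pvInfix_of_append hm)
        have hr2 : ¬ pvM2 <:+: r := fun hm => h2 (by rw [← hr]; exact pvInfix_of_append hm)
        have hihr := ih r hlen hr1 hr2
        simp only [pvKEYS, List.mem_cons, List.not_mem_nil, or_false] at hmem
        rcases hmem with hmem | hmem | hmem | hmem | hmem | hmem | hmem | hmem | hmem
        · subst hmem
          rw [← hr, pvChain_split_A r, hihr]
        · subst hmem
          rw [← hr, pvChain_split_In r, hihr]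
        · subst hmem
          rw [← hr, pvChain_split_Hi r, hihr]
        · subst hmem
          rw [← hr, pvChain_split_LQ r, hihr]
        · subst hmem
          rw [← hr, pvChain_split_LT r, hihr]
        · subst hmem
          rw [← hr, pvChain_split_DQ r, hihr]
        · subst hmem
          rw [← hr, pvChain_split_PP r, hihr]
        · subst hmem
          have hrk : ¬ pvRack <+: r := by
            intro hrk
            obtain ⟨e, he⟩ := hrk
            exact h1 ⟨[], e, by rw [← hr, ← he]; rfl⟩
          rw [← hr, pvChain_split_MI r hrk, hihr]
        · subst hmem
          have hit : ¬ pvItial <+: r := by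
            intro hit
            obtain ⟨e, he⟩ := hit
            exact h2 ⟨[], e, by rw [← hr, ← he]; rfl⟩
          rw [← hr, pvChain_split_MO r hit, hihr]

theorem pvLitkA : ("trackingParticleRecoAsssociation" : String).toList = pvkA := by decide
theorem pvLitkIn : ("InitialStep" : String).toList = pvkIn := by decide
theorem pvLitkHi : ("HighPtTripletStep" : String).toList = pvkHi := by decide
theorem pvLitkLQ : ("LowPtQuadStep" : String).toList = pvkLQ := by decide
theorem pvLitkLT : ("LowPtTripletStep" : String).toList = pvkLT := by decide
theorem pvLitkDQ : ("DetachedQuadStep" : String).toList = pvkDQ := by decide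
theorem pvLitkPP : ("PixelPairStep" : String).toList = pvkPP := by decide
theorem pvLitkMI : ("MuonSeededStepInOut" : String).toList = pvkMI := by decide
theorem pvLitkMO : ("MuonSeededStepOutIn" : String).toList = pvkMO := by decide
theorem pvLitvA : ("AssociatorByHitsRecoDenom" : String).toList = pvvA := by decide
theorem pvLitvIn : ("Zero" : String).toList = pvvIn := by decide
theorem pvLitvHi : ("First" : String).toList = pvvHi := by decide
theorem pvLitvLQ : ("Second" : String).toList = pvvLQ := by decide
theorem pvLitvLT : ("Third" : String).toList = pvvLT := by decide
theorem pvLitvDQ : ("Fourth" : String).toList = pvvDQ := by decide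
theorem pvLitvPP : ("Fifth" : String).toList = pvvPP := by decide
theorem pvLitvMI : ("Ninth" : String).toList = pvvMI := by decide
theorem pvLitvMO : ("Tenth" : String).toList = pvvMO := by decide

theorem pvA_toList (s : String) :
    (List.foldl (fun (r : String) (p : String × String) => PySem.Str.replace r p.1 p.2)
      (PySem.Str.replace s "trackingParticleRecoAsssociation" "AssociatorByHitsRecoDenom")
      [("InitialStep",         "Zero"),
       ("HighPtTripletStep",   "First"),
       ("LowPtQuadStep",       "Second"),
       ("LowPtTripletStep",    "Third"),
       ("DetachedQuadStep",    "Fourth"),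
       ("PixelPairStep",       "Fifth"),
       ("MuonSeededStepInOut", "Ninth"),
       ("MuonSeededStepOutIn", "Tenth")]).toList = pvChain s.toList := by
  simp only [List.foldl, PySem.Str.toList_replace]
  rw [pvReplace_eq _ _ _ (by decide)]
  rw [pvReplace_eq _ _ _ (by decide)]
  rw [pvReplace_eq _ _ _ (by decide)]
  rw [pvReplace_eq _ _ _ (by decide)]
  rw [pvReplace_eq _ _ _ (by decide)]
  rw [pvReplace_eq _ _ _ (by decide)]
  rw [pvReplace_eq _ _ _ (by decide)]
  rw [pvReplace_eq _ _ _ (by decide)]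
  rw [pvReplace_eq _ _ _ (by decide)]
  rw [pvLitkA, pvLitvA, pvLitkIn, pvLitvIn, pvLitkHi, pvLitvHi, pvLitkLQ, pvLitvLQ, pvLitkLT, pvLitvLT, pvLitkDQ, pvLitvDQ, pvLitkPP, pvLitvPP, pvLitkMI, pvLitvMI, pvLitkMO, pvLitvMO]
  simp [pvChain, pvKEYS, List.foldl]

-- ===== VERDICT (by name: the statement is the Claim_ definition above) =====
theorem trackingSubFoldersFallbackSLHC_Phase1PU140_py_spec : Claim_equal_trackingSubFoldersFallbackSLHC_Phase1PU140_py := by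
  intro s _hdom hpre
  obtain ⟨hp1, hp2⟩ := hpre
  have h1 : ¬ pvM1 <:+: s.toList := by
    intro hm
    have ht : PySem.Str.isIn "MuonSeededStepInOutrackingParticleRecoAsssociation" s = true :=
      (PySem.Str.isIn_iff_infix _ _).mpr (by rw [show ("MuonSeededStepInOutrackingParticleRecoAsssociation" : String).toList = pvM1 from by decide]; exact hm)
    rw [hp1] at ht
    cases ht
  have h2 : ¬ pvM2 <:+: s.toList := by
    intro hm
    have ht : PySem.Str.isIn "MuonSeededStepOutInitialStep" s = true :=
      (PySem.Str.isIn_iff_infix _ _).mpr (by rw [show ("MuonSeededStepOutInitialStep" : String).toList = pvM2 from by decide]; exact hm)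
    rw [hp2] at ht
    cases ht
  have hlist : pvChain s.toList = pvScan s.toList := pvMain s.toList.length s.toList le_rfl h1 h2
  unfold Spec_trackingSubFoldersFallbackSLHC_Phase1PU140_py trackingSubFoldersFallbackSLHC_Phase1PU140_py trackingSubFoldersFallbackSLHC_Phase1PU140_py_alt
  have hret : (List.foldl (fun (r : String) (p : String × String) => PySem.Str.replace r p.1 p.2)
      (PySem.Str.replace s "trackingParticleRecoAsssociation" "AssociatorByHitsRecoDenom")
      [("InitialStep",         "Zero"),
       ("HighPtTripletStep",   "First"),
       ("LowPtQuadStep",       "Second"),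
       ("LowPtTripletStep",    "Third"),
       ("DetachedQuadStep",    "Fourth"),
       ("PixelPairStep",       "Fifth"),
       ("MuonSeededStepInOut", "Ninth"),
       ("MuonSeededStepOutIn", "Tenth")]) = String.ofList (pvScan s.toList) := by
    apply String.toList_inj.mp
    rw [String.toList_ofList, pvA_toList, hlist]
  simp only [hret]
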